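-- pv_equiv track=rewrite | github.com/slothoth/sql_checker | graph/param_calcs.py | seed_from_old_map
-- ===== SOURCE A (Python) =====
-- from collections import defaultdict
--
-- def parse_param_field(field):
--     if not field.startswith("param_"):
--         return None, None
--     parts = field.split("_")
--     if len(parts) < 3:
--         return None, None
--     try:
--         return parts[1], int(parts[2])
--     except:
--         return None, None
--
-- def seed_from_old_map(old_req_arg_type_list_map):
--     old_color = defaultdict(dict)
--     used = defaultdict(set)
--     for effect, m in old_req_arg_type_list_map.items():
--         for p, arg in m.items():
--             t, idx = parse_param_field(p)
--             if t is None: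
--                 continue
--             if arg in old_color[t]:
--                 used[t].add(old_color[t][arg])
--             else:
--                 old_color[t][arg] = idx
--                 used[t].add(idx)
--     return old_color, used
-- ===== SOURCE B (Python) =====
-- from collections import defaultdict
--
-- def parse_param_field(field):
--     if not field.startswith("param_"):
--         return None, None
--     parts = field.split("_")
--     if len(parts) < 3:
--         return None, None
--     try:
--         return parts[1], int(parts[2])
--     except:
--         return None, None
--
-- def seed_from_old_map(old_req_arg_type_list_map):
--     # stage 1: flatten the nested dict into a stream of parsed (type, idx, arg) triples
--     triples = [(t, idx, arg)
--                for m in old_req_arg_type_list_map.values()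
--                for p, arg in m.items()
--                for t, idx in [parse_param_field(p)]
--                if t is not None]
--     # stage 2: first-seen colour per (type, arg), via setdefault over the flat stream
--     old_color = defaultdict(dict)
--     for t, idx, arg in triples:
--         old_color.setdefault(t, {}).setdefault(arg, idx)
--     # stage 3: the used indices of a type are exactly the colours stored for it
--     used = defaultdict(set)
--     for t, cm in old_color.items():
--         used[t] = set(cm.values())
--     return old_color, used
-- ===== Notes on version B (the rewrite author's own statement) =====
-- stated objective: alternative
-- what changed: A interleaves colour and used bookkeeping in one pass over the nested dict; B first flattens the nested dict into a stream of parsed (type, idx, arg) triples, builds only old_color via setdefault over that flat stream, then derives used[t] = set(old_color[t].values()) in a final pass over old_color.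
import Mathlib
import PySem

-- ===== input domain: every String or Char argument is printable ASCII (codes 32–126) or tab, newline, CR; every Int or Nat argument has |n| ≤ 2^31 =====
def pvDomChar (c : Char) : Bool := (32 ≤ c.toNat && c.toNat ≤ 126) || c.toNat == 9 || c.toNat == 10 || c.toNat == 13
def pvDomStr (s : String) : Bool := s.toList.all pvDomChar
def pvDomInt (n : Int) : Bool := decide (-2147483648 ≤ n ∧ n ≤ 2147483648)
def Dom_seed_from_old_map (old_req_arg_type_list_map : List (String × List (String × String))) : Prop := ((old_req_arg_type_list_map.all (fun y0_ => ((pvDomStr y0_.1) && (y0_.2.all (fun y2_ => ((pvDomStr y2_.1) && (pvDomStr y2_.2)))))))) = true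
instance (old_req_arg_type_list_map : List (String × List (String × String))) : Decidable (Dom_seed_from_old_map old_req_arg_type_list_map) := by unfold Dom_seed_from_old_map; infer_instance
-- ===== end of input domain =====

-- B replaces A's single interleaved pass by three stages: flatten the nested dict into
-- parsed (type, idx, arg) triples, build only old_color via setdefault over that stream,
-- then derive used[t] as set(old_color[t].values()).

-- ===== PORT A =====
-- parse_param_field is defined identically in Source A and Source B; one shared port.
def parse_param_field (field : String) : Option String × Option Int :=
  if !(PySem.Str.startswith field "param_") then (none, none)
  else
    -- sep "_" is nonempty, so Str.split? is always `some`
    let parts := (PySem.Str.split? field "_").getD []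
    if parts.length < 3 then (none, none)
    else
      -- the try only catches int(); the two indexings are in range (length ≥ 3)
      match PySem.Int.ofStr? (parts.getD 2 "") with
      | some i => (some (parts.getD 1 ""), some i)
      | none => (none, none)

def seedStepA (st : PySem.Dict String (PySem.Dict String Int) × PySem.Dict String (PySem.Set Int))
    (pa : String × String) :
    PySem.Dict String (PySem.Dict String Int) × PySem.Dict String (PySem.Set Int) :=
  match parse_param_field pa.1 with
  | (some t, some idx) =>
      -- defaultdict: evaluating old_color[t] creates an empty dict for a missing t
      let oc := if st.1.contains t then st.1 else st.1.insert t PySem.Dict.empty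
      let ct := oc.getD t PySem.Dict.empty
      if ct.contains pa.2 then
        (oc, st.2.modify t PySem.Set.empty (fun s => PySem.Set.add s (ct.getD pa.2 0)))
      else
        (oc.insert t (ct.insert pa.2 idx),
         st.2.modify t PySem.Set.empty (fun s => PySem.Set.add s idx))
  | _ => st

def seed_from_old_map (old_req_arg_type_list_map : List (String × List (String × String))) : (List (String × List (String × Int))) × (List (String × List Int)) :=
  let st := old_req_arg_type_list_map.foldl (fun st e => e.2.foldl seedStepA st)
              (PySem.Dict.empty, PySem.Dict.empty)
  (st.1.items.map (fun p => (p.1, p.2.items)), st.2.items)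

-- ===== PORT B =====
-- stage 1 item: a parsed (type, idx, arg) triple, or nothing for an unparsable field
def parseTriple (pa : String × String) : Option (String × Int × String) :=
  match parse_param_field pa.1 with
  | (some t, some i) => some (t, i, pa.2)
  | _ => none

-- stage 2 step: old_color.setdefault(t, {}).setdefault(arg, idx)
-- (Dict.insert overwrites in place, so re-inserting at t models the in-place mutation)
def addTriple (oc : PySem.Dict String (PySem.Dict String Int)) (tr : String × Int × String) :
    PySem.Dict String (PySem.Dict String Int) :=
  let cm := oc.getD tr.1 PySem.Dict.empty
  oc.insert tr.1 (if cm.contains tr.2.2 then cm else cm.insert tr.2.2 tr.2.1)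

def seed_from_old_map_alt (old_req_arg_type_list_map : List (String × List (String × String))) : (List (String × List (String × Int))) × (List (String × List Int)) :=
  let triples := (old_req_arg_type_list_map.flatMap (fun e => e.2)).filterMap parseTriple
  let oc := triples.foldl addTriple PySem.Dict.empty
  let used := oc.items.foldl
      (fun (u : PySem.Dict String (PySem.Set Int)) p =>
        u.insert p.1 (PySem.Set.ofList (PySem.Dict.values p.2)))
      PySem.Dict.empty
  (oc.items.map (fun p => (p.1, p.2.items)), used.items)

-- ===== PRECONDITION & SPEC =====
def Spec_seed_from_old_map (old_req_arg_type_list_map : List (String × List (String × String))) (out : (List (String × List (String × Int))) × (List (String × List Int))) : Prop := out = seed_from_old_map_alt old_req_arg_type_list_map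
instance (old_req_arg_type_list_map : List (String × List (String × String))) (out : (List (String × List (String × Int))) × (List (String × List Int))) : Decidable (Spec_seed_from_old_map old_req_arg_type_list_map out) := by unfold Spec_seed_from_old_map; infer_instance

-- ===== CLAIM (what is proved, stated in full; the proofs are below) =====
def Claim_equal_seed_from_old_map : Prop := ∀ (old_req_arg_type_list_map : List (String × List (String × String))), Dom_seed_from_old_map old_req_arg_type_list_map → Spec_seed_from_old_map old_req_arg_type_list_map (seed_from_old_map old_req_arg_type_list_map)

-- ===== LEMMAS AND PROOFS =====

-- "used value of a colour-map entry": used[t] is the set of colours stored for t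
def pvUsedOf (p : String × PySem.Dict String Int) : String × PySem.Set Int :=
  (p.1, PySem.Set.ofList (PySem.Dict.values p.2))

-- a first-found entry is rewritten to itself: insert of the present value is the identity
lemma pv_replace_first_self {κ ν : Type} [BEq κ] [LawfulBEq κ] :
    ∀ (l : List (κ × ν)) (k : κ) (v : ν),
      (l.map Prod.fst).Nodup → List.find? (fun p => p.1 == k) l = some (k, v) →
      l.map (fun p => if (p.1 == k) = true then (k, v) else p) = l := by
  intro l k v hn hf
  induction l with
  | nil => simp at hf
  | cons a rest ih =>
    rw [List.map_cons, List.nodup_cons] at hn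
    by_cases ha : (a.1 == k) = true
    · rw [List.find?_cons_of_pos (p := fun (q : κ × ν) => q.1 == k) ha] at hf
      injection hf with hf
      subst hf
      rw [List.map_cons, if_pos ha]
      have hak : ((k, v) : κ × ν).1 = k := by simpa using ha
      congr 1
      have hrest : ∀ p ∈ rest, (if (p.1 == k) = true then ((k, v) : κ × ν) else p) = p := by
        intro p hp
        rw [if_neg]
        simp only [beq_iff_eq]
        intro he
        exact hn.1 (by rw [hak, ← he]; exact List.mem_map_of_mem hp)
      rw [List.map_congr_left hrest]; simp
    · rw [List.find?_cons_of_neg (p := fun (q : κ × ν) => q.1 == k) ha] at hf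
      rw [List.map_cons, if_neg ha, ih hn.2 hf]

-- inserting a key's current value changes nothing (unique keys)
lemma pv_insert_getD_self {κ ν : Type} [BEq κ] [LawfulBEq κ]
    (d : PySem.Dict κ ν) (k : κ) (dflt : ν)
    (hc : d.contains k = true) (hn : d.keys.Nodup) :
    d.insert k (d.getD k dflt) = d := by
  apply PySem.Dict.ext
  rw [PySem.Dict.items_insert_of_contains d _ hc]
  have hsome : (d.get? k).isSome := by rw [← PySem.Dict.contains_eq_isSome_get?]; exact hc
  rcases hf : List.find? (fun p => p.1 == k) d.items with _ | ⟨k0, v0⟩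
  · exfalso; simp [PySem.Dict.get?, hf] at hsome
  · have hk0 : k0 = k := by
      have := List.find?_some hf; simpa using this
    rw [hk0] at hf
    have hg : d.getD k dflt = v0 := by simp [PySem.Dict.getD, PySem.Dict.get?, hf]
    rw [hg]
    exact pv_replace_first_self d.items k v0 hn hf

-- inserting twice at the same key keeps only the second value
lemma pv_insert_insert {κ ν : Type} [BEq κ] [LawfulBEq κ]
    (d : PySem.Dict κ ν) (k : κ) (v w : ν) :
    (d.insert k v).insert k w = d.insert k w := by
  apply PySem.Dict.ext
  by_cases hc : d.contains k = true
  · rw [PySem.Dict.items_insert_of_contains _ _ (PySem.Dict.contains_insert_self d k v),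
        PySem.Dict.items_insert_of_contains d _ hc,
        PySem.Dict.items_insert_of_contains d _ hc, List.map_map]
    apply List.map_congr_left
    intro p _
    by_cases hp : (p.1 == k) = true <;> simp [hp]
  · have hc' : d.contains k = false := by simpa using hc
    rw [PySem.Dict.items_insert_of_contains _ _ (PySem.Dict.contains_insert_self d k v),
        PySem.Dict.items_insert_of_not_contains d _ hc',
        PySem.Dict.items_insert_of_not_contains d _ hc']
    have hnone : ∀ p ∈ d.items, ¬ ((p.1 == k) = true) := by
      intro p hp
      simp only [PySem.Dict.contains, List.any_eq_false] at hc'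
      exact hc' p hp
    rw [List.map_append]
    congr 1
    · have hid : ∀ p ∈ d.items, (if (p.1 == k) = true then (k, w) else p) = p := by
        intro p hp; rw [if_neg (hnone p hp)]
      rw [List.map_congr_left hid]; simp
    · simp

-- get? through the pointwise used-map
lemma pv_get?_map_usedOf (l : List (String × PySem.Dict String Int)) (k : String) :
    (PySem.Dict.mk (l.map pvUsedOf)).get? k
      = ((PySem.Dict.mk l : PySem.Dict String (PySem.Dict String Int)).get? k).map
          (fun d => PySem.Set.ofList (PySem.Dict.values d)) := by
  induction l with
  | nil => simp [PySem.Dict.get?]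
  | cons a rest ih =>
    obtain ⟨a1, a2⟩ := a
    rw [List.map_cons]
    show (PySem.Dict.mk ((a1, PySem.Set.ofList (PySem.Dict.values a2)) :: rest.map pvUsedOf)).get? k = _
    rw [PySem.Dict.get?_mk_cons, PySem.Dict.get?_mk_cons]
    by_cases ha : (a1 == k) = true
    · rw [if_pos ha, if_pos ha]; rfl
    · rw [if_neg ha, if_neg ha]; exact ih

lemma pv_set_ofList_append (xs : List Int) (x : Int) :
    PySem.Set.ofList (xs ++ [x]) = PySem.Set.add (PySem.Set.ofList xs) x := by
  simp [PySem.Set.ofList, List.foldl_append]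

lemma pv_set_add_mem (s : PySem.Set Int) (x : Int) (h : x ∈ s) :
    PySem.Set.add s x = s := by
  simp only [PySem.Set.add, PySem.Set.contains]
  rw [if_pos]
  simpa using h

-- A's step preserves: unique keys, and used = pointwise set-of-values of old_color
lemma pv_stepA_inv (oc : PySem.Dict String (PySem.Dict String Int))
    (u : PySem.Dict String (PySem.Set Int)) (pa : String × String)
    (h1 : oc.keys.Nodup) (h2 : u.items = oc.items.map pvUsedOf) :
    (seedStepA (oc, u) pa).1.keys.Nodup ∧
      (seedStepA (oc, u) pa).2.items = (seedStepA (oc, u) pa).1.items.map pvUsedOf := by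
  have hu : u = PySem.Dict.mk (oc.items.map pvUsedOf) := PySem.Dict.ext h2
  subst hu
  have hget : ∀ k, (PySem.Dict.mk (oc.items.map pvUsedOf)).get? k
      = (oc.get? k).map (fun d => PySem.Set.ofList (PySem.Dict.values d)) :=
    fun k => pv_get?_map_usedOf oc.items k
  have hcontains : ∀ k, (PySem.Dict.mk (oc.items.map pvUsedOf)).contains k = oc.contains k := by
    intro k
    rw [PySem.Dict.contains_eq_isSome_get?, PySem.Dict.contains_eq_isSome_get?, hget]
    simp
  have hukeys : (PySem.Dict.mk (oc.items.map pvUsedOf)).keys.Nodup := by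
    have : (PySem.Dict.mk (oc.items.map pvUsedOf)).keys = oc.keys := by
      simp [PySem.Dict.keys, pvUsedOf, Function.comp]
    rw [this]; exact h1
  unfold seedStepA
  rcases h : parse_param_field pa.1 with ⟨_ | t, _ | i⟩
  · exact ⟨h1, h2⟩
  · exact ⟨h1, h2⟩
  · exact ⟨h1, h2⟩
  · simp only [PySem.Dict.modify]
    by_cases hc : oc.contains t = true
    · rw [if_pos hc]
      have hsome : (oc.get? t).isSome := by rw [← PySem.Dict.contains_eq_isSome_get?]; exact hc
      rcases hg : oc.get? t with _ | ct0
      · rw [hg] at hsome; simp at hsome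
      have hctd : oc.getD t PySem.Dict.empty = ct0 := by
        simp [PySem.Dict.getD, hg]
      have hug : (PySem.Dict.mk (oc.items.map pvUsedOf)).getD t PySem.Set.empty
          = PySem.Set.ofList (PySem.Dict.values ct0) := by
        simp [PySem.Dict.getD, hget, hg]
      rw [hctd]
      by_cases hca : ct0.contains pa.2 = true
      · rw [if_pos hca]
        refine ⟨h1, ?_⟩
        -- the added colour is already among ct0's values, so the set add is a no-op
        have hvsome : (ct0.get? pa.2).isSome := by
          rw [← PySem.Dict.contains_eq_isSome_get?]; exact hca
        rcases hvg : ct0.get? pa.2 with _ | v0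
        · rw [hvg] at hvsome; simp at hvsome
        have hvd : ct0.getD pa.2 0 = v0 := by simp [PySem.Dict.getD, hvg]
        have hmemv : v0 ∈ PySem.Dict.values ct0 := by
          have := PySem.Dict.mem_items_of_get?_eq_some ct0 hvg
          simp only [PySem.Dict.values]
          exact List.mem_map_of_mem this
        have hmem : v0 ∈ PySem.Set.ofList (PySem.Dict.values ct0) :=
          (PySem.Set.mem_ofList _ _).mpr hmemv
        rw [hug, hvd, pv_set_add_mem _ _ hmem, ← hug,
          pv_insert_getD_self _ t _ (by rw [hcontains]; exact hc) hukeys]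
      · rw [if_neg hca]
        have hca' : ct0.contains pa.2 = false := by simpa using hca
        refine ⟨PySem.Dict.nodup_keys_insert _ _ _ h1, ?_⟩
        rw [hug]
        rw [PySem.Dict.items_insert_of_contains _ _ (by rw [hcontains]; exact hc),
            PySem.Dict.items_insert_of_contains _ _ hc]
        show List.map _ (oc.items.map pvUsedOf) = _
        rw [List.map_map, List.map_map]
        apply List.map_congr_left
        intro p _
        by_cases hp : (p.1 == t) = true
        · have hp' : ((pvUsedOf p).1 == t) = true := hp
          simp only [Function.comp_apply, hp', hp, if_pos]
          have hv' : PySem.Dict.values (ct0.insert pa.2 i)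
              = PySem.Dict.values ct0 ++ [i] := by
            simp [PySem.Dict.values, PySem.Dict.items_insert_of_not_contains ct0 _ hca']
          simp only [pvUsedOf]
          rw [hv', pv_set_ofList_append]
        · have hp' : ¬ ((pvUsedOf p).1 == t) = true := hp
          simp only [Function.comp_apply, if_neg hp, if_neg hp']
    · have hc' : oc.contains t = false := by simpa using hc
      rw [if_neg hc]
      have hctd : (oc.insert t PySem.Dict.empty).getD t PySem.Dict.empty = PySem.Dict.empty := by
        simp [PySem.Dict.getD, PySem.Dict.get?_insert_self]
      rw [hctd]
      have hca : ¬ ((PySem.Dict.empty : PySem.Dict String Int).contains pa.2 = true) := by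
        simp [PySem.Dict.contains, PySem.Dict.empty]
      rw [if_neg hca]
      rw [pv_insert_insert oc t PySem.Dict.empty]
      refine ⟨PySem.Dict.nodup_keys_insert _ _ _ h1, ?_⟩
      have hucontains : (PySem.Dict.mk (oc.items.map pvUsedOf)).contains t = false := by
        rw [hcontains]; exact hc'
      have hugD : (PySem.Dict.mk (oc.items.map pvUsedOf)).getD t PySem.Set.empty
          = PySem.Set.empty := PySem.Dict.getD_of_not_contains _ _ hucontains
      rw [hugD]
      rw [PySem.Dict.items_insert_of_not_contains _ _ hucontains,
          PySem.Dict.items_insert_of_not_contains _ _ hc']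
      simp [pvUsedOf, PySem.Set.add, PySem.Set.empty, PySem.Set.contains,
        PySem.Set.ofList, PySem.Dict.values, PySem.Dict.empty, PySem.Dict.contains,
        PySem.Dict.insert, PySem.Dict.items]

def pvInv (st : PySem.Dict String (PySem.Dict String Int) × PySem.Dict String (PySem.Set Int)) : Prop :=
  st.1.keys.Nodup ∧ st.2.items = st.1.items.map pvUsedOf

-- colour component of A's step = B's setdefault step on the parsed triple (unique keys)
lemma pv_stepA_fst (st : PySem.Dict String (PySem.Dict String Int) × PySem.Dict String (PySem.Set Int))
    (pa : String × String) (hn : st.1.keys.Nodup) :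
    (seedStepA st pa).1
      = (match parseTriple pa with
         | some tr => addTriple st.1 tr
         | none => st.1) := by
  unfold seedStepA parseTriple addTriple
  rcases h : parse_param_field pa.1 with ⟨_ | t, _ | i⟩ <;> simp only [h]
  by_cases hc : st.1.contains t = true
  · rw [if_pos hc]
    by_cases hca : (st.1.getD t PySem.Dict.empty).contains pa.2 = true
    · rw [if_pos hca, if_pos hca]
      exact (pv_insert_getD_self st.1 t PySem.Dict.empty hc hn).symm
    · rw [if_neg hca, if_neg hca]
  · have hc' : st.1.contains t = false := by simpa using hc
    rw [if_neg hc]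
    have hgd : (st.1.insert t PySem.Dict.empty).getD t PySem.Dict.empty = PySem.Dict.empty := by
      simp [PySem.Dict.getD, PySem.Dict.get?_insert_self]
    have hgd0 : st.1.getD t PySem.Dict.empty = PySem.Dict.empty :=
      PySem.Dict.getD_of_not_contains _ _ hc'
    have hca : ((PySem.Dict.empty : PySem.Dict String Int).contains pa.2) = false := by
      simp [PySem.Dict.contains, PySem.Dict.empty]
    rw [hgd, hgd0, hca]
    simp only [Bool.false_eq_true, if_false]
    exact pv_insert_insert st.1 t PySem.Dict.empty _

-- fold of A's step over a flat pair list = fold of B's step over the parsed triples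
lemma pv_foldl_pairs (ps : List (String × String)) :
    ∀ st, pvInv st →
      (ps.foldl seedStepA st).1 = (ps.filterMap parseTriple).foldl addTriple st.1 ∧
        pvInv (ps.foldl seedStepA st) := by
  induction ps with
  | nil => intro st h; exact ⟨rfl, h⟩
  | cons p rest ih =>
    intro st h
    have hinv : pvInv (seedStepA st p) := by
      have := pv_stepA_inv st.1 st.2 p h.1 h.2
      simpa [pvInv] using this
    have hr := ih (seedStepA st p) hinv
    have hf := pv_stepA_fst st p h.1
    rcases hp : parseTriple p with _ | tr <;>
      rw [hp] at hf <;>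
      simp only [List.foldl_cons, List.filterMap_cons, hp] <;>
      exact ⟨by rw [hr.1, hf], hr.2⟩

-- the nested fold over the dict-of-dicts is the flat fold over all inner pairs
lemma pv_foldl_flat {α β γ : Type} (f : γ → β → γ) (l : List (α × List β)) :
    ∀ (st : γ),
      l.foldl (fun st e => e.2.foldl f st) st = (l.flatMap (fun e => e.2)).foldl f st := by
  induction l with
  | nil => intro st; rfl
  | cons e rest ih => intro st; simp only [List.foldl_cons, List.flatMap_cons,
      List.foldl_append, ih]

-- ===== VERDICT (by name: the statement is the Claim_ definition above) =====
theorem seed_from_old_map_spec : Claim_equal_seed_from_old_map := by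
  unfold Claim_equal_seed_from_old_map
  intro l _
  unfold Spec_seed_from_old_map seed_from_old_map seed_from_old_map_alt
  have h0 : pvInv (PySem.Dict.empty, PySem.Dict.empty) := by
    unfold pvInv
    exact ⟨by simp [PySem.Dict.empty, PySem.Dict.keys], rfl⟩
  rw [pv_foldl_flat seedStepA l]
  have h := pv_foldl_pairs (l.flatMap (fun e => e.2)) (PySem.Dict.empty, PySem.Dict.empty) h0
  obtain ⟨hfst, hnod, hitems⟩ := h
  set stA := (l.flatMap (fun e => e.2)).foldl seedStepA (PySem.Dict.empty, PySem.Dict.empty) with hstA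
  show (stA.1.items.map (fun p => (p.1, p.2.items)), stA.2.items)
      = (((l.flatMap (fun e => e.2)).filterMap parseTriple).foldl addTriple PySem.Dict.empty
          |>.items.map (fun p => (p.1, p.2.items)),
         (((l.flatMap (fun e => e.2)).filterMap parseTriple).foldl addTriple PySem.Dict.empty
          |>.items.foldl (fun (u : PySem.Dict String (PySem.Set Int)) p =>
              u.insert p.1 (PySem.Set.ofList (PySem.Dict.values p.2))) PySem.Dict.empty).items)
  rw [← hfst]
  have husedB : (stA.1.items.foldl
      (fun (u : PySem.Dict String (PySem.Set Int)) p =>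
        u.insert p.1 (PySem.Set.ofList (PySem.Dict.values p.2))) PySem.Dict.empty).items
      = stA.1.items.map pvUsedOf := by
    have := PySem.Dict.items_foldl_insert_fresh
      (l := stA.1.items)
      (k := fun p => p.1) (v := fun p => PySem.Set.ofList (PySem.Dict.values p.2))
      (d := PySem.Dict.empty)
      (by intro a _; simp [PySem.Dict.contains, PySem.Dict.empty])
      (by simpa [PySem.Dict.keys] using hnod)
    simpa [pvUsedOf, PySem.Dict.empty] using this
  rw [husedB, hitems]
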